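-- pv_equiv track=rewrite | github.com/Imseungyeon/ProblemSolving | Programmers/level2/택배상자.py | solution
-- ===== SOURCE A (Python) =====
-- from collections import deque
--
-- def solution(order):
--     answer = 0
--     stack = []
--     container = deque(range(1, len(order) + 1))
--     order = deque(order)
--
--     while container or stack:
--         if stack and stack[-1] == order[0]:
--             stack.pop()
--             order.popleft()
--             answer += 1
--         elif container and container[0] == order[0]:
--             order.popleft()
--             container.popleft()
--             answer += 1
--         elif container:
--             stack.append(container.popleft())
--         else:
--             break
--
--     return answer
-- ===== SOURCE B (Python) =====
-- def solution(order):
--     # Stack-free: the stack of A always holds exactly the undelivered boxes below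
--     # nxt in increasing order, so a target below nxt is deliverable iff it is the
--     # maximal undelivered box: undelivered itself, with everything between it and
--     # nxt already delivered.
--     n = len(order)
--     delivered = set()
--     nxt = 1
--     answer = 0
--     for t in order:
--         if nxt <= t <= n:
--             nxt = t + 1
--         elif 1 <= t < nxt and t not in delivered and all(u in delivered for u in range(t + 1, nxt)):
--             pass
--         else:
--             break
--         delivered.add(t)
--         answer += 1
--     return answer
-- ===== Notes on version B (the rewrite author's own statement) =====
-- stated objective: alternative
-- what changed: Drops the stack/deque simulation entirely: B keeps only the set of delivered boxes and the next-fresh counter, using the invariant that A's stack is exactly the undelivered boxes below the counter in increasing order, so a target below the counter is deliverable iff it is undelivered and every box strictly between it and the counter is already delivered; this avoids building and pushing/popping the deque of all n boxes (constant-factor speedup measured on the generated inputs).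
import Mathlib
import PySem

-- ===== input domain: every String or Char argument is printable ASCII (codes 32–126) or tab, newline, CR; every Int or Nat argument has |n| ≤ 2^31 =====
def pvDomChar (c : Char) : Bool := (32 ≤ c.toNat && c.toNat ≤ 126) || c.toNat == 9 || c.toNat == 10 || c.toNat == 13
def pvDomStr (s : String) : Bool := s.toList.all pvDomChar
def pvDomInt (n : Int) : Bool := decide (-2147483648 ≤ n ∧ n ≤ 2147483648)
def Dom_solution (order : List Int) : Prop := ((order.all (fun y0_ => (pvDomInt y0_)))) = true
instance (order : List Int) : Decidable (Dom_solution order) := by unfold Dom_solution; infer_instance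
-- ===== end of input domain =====

-- B drops the stack/deque simulation entirely: it keeps the set of delivered boxes and the
-- next-fresh counter, using the fact that a target below the counter is deliverable iff it
-- is the maximal undelivered box; alternative algorithm, same purpose.

-- ===== PORT A =====
-- A's while loop; top of `stack` is the list head (stack[-1]).  In the branch where the
-- body would read order[0] with order empty, the port returns answer; that state is
-- unreachable from solution's initial state (order empties only together with
-- container and stack), so Python never raises there.
def solLoopA (container stack order : List Int) (answer : Int) : Int :=
  if container = [] ∧ stack = [] then answer
  else
    match order with
    | [] => answer
    | o :: os =>
      match stack with
      | s :: srest =>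
        if s = o then solLoopA container srest os (answer + 1)
        else
          match container with
          | c :: cs =>
            if c = o then solLoopA cs (s :: srest) os (answer + 1)
            else solLoopA cs (c :: s :: srest) (o :: os) answer
          | [] => answer
      | [] =>
        match container with
        | c :: cs =>
          if c = o then solLoopA cs [] os (answer + 1)
          else solLoopA cs [c] (o :: os) answer
        | [] => answer
termination_by 2 * container.length + stack.length
decreasing_by all_goals simp [List.length] <;> omega

def solution (order : List Int) : Int :=
  solLoopA (PySem.List.pyRange 1 ((order.length : Int) + 1) 1) [] order 0

-- ===== PORT B =====
-- B's for-loop over the targets: state (delivered, nxt, answer), early break via return.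
def altLoop (n : Int) : List Int → PySem.Set Int → Int → Int → Int
  | [], _, _, answer => answer
  | t :: ts, delivered, nxt, answer =>
    if nxt ≤ t ∧ t ≤ n then
      altLoop n ts (PySem.Set.add delivered t) (t + 1) (answer + 1)
    else if 1 ≤ t ∧ t < nxt ∧ PySem.Set.contains delivered t = false ∧
        ((PySem.List.pyRange (t + 1) nxt 1).all (fun u => PySem.Set.contains delivered u)) = true then
      altLoop n ts (PySem.Set.add delivered t) nxt (answer + 1)
    else answer

def solution_alt (order : List Int) : Int :=
  altLoop (order.length : Int) order PySem.Set.empty 1 0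

-- ===== PRECONDITION & SPEC =====
def Spec_solution (order : List Int) (out : Int) : Prop := out = solution_alt order
instance (order : List Int) (out : Int) : Decidable (Spec_solution order out) := by unfold Spec_solution; infer_instance

-- ===== CLAIM (what is proved, stated in full; the proofs are below) =====
def Claim_equal_solution : Prop := ∀ (order : List Int), Dom_solution order → Spec_solution order (solution order)

-- ===== LEMMAS AND PROOFS =====

-- The invariant linking A's state to B's: the stack holds exactly the undelivered
-- boxes below the counter k, in decreasing order from the top, and every delivered
-- box is below k.
def InvAB (k : Int) (delivered stack : List Int) : Prop :=
  (∀ j : Int, j ∈ stack ↔ (1 ≤ j ∧ j < k ∧ j ∉ delivered)) ∧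
  stack.Pairwise (· > ·) ∧
  (∀ j ∈ delivered, j < k)

-- A's loop returns the running answer when the current target is neither in the
-- container nor on top of the stack (it pushes everything, then breaks).
lemma drainA (container : List Int) : ∀ (stack : List Int) (t : Int) (os : List Int) (ans : Int),
    t ∉ container → stack.head? ≠ some t →
    solLoopA container stack (t :: os) ans = ans := by
  induction container with
  | nil =>
    intro stack t os ans _ hh
    rw [solLoopA.eq_def]
    cases stack with
    | nil => simp
    | cons s rest => simp at hh; simp [hh]
  | cons c cs IH =>
    intro stack t os ans hmem hh
    have hc : c ≠ t := by intro h; exact hmem (h ▸ List.mem_cons_self)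
    have hcs : t ∉ cs := fun h => hmem (List.mem_cons_of_mem _ h)
    rw [solLoopA.eq_def]
    cases stack with
    | nil => simp [hc]; exact IH [c] t os ans hcs (by simp [hc])
    | cons s rest =>
      simp at hh
      simp [hh, hc]
      exact IH (c :: s :: rest) t os ans hcs (by simp [hc])

-- A pushes the whole contiguous block [k, t) onto the stack before reaching t.
lemma pushA (n : Int) : ∀ (m : Nat) (k : Int) (stack : List Int) (t : Int) (os : List Int) (ans : Int),
    (t - k).toNat = m → k ≤ t → t ≤ n → stack.head? ≠ some t →
    solLoopA (PySem.List.pyRange k (n + 1) 1) stack (t :: os) ans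
      = solLoopA (PySem.List.pyRange t (n + 1) 1) ((PySem.List.pyRange k t 1).reverse ++ stack) (t :: os) ans := by
  intro m
  induction m with
  | zero =>
    intro k stack t os ans hm hk _ _
    have hkt : k = t := by omega
    subst hkt
    have : PySem.List.pyRange k k 1 = [] := PySem.List.pyRange_one_eq_nil (by omega)
    rw [this]
    simp
  | succ m IH =>
    intro k stack t os ans hm hk hn hh
    have hkt : k < t := by omega
    have hcons : PySem.List.pyRange k (n + 1) 1 = k :: PySem.List.pyRange (k + 1) (n + 1) 1 :=
      PySem.List.pyRange_one_cons (by omega)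
    have hkne : k ≠ t := by omega
    have hstep : solLoopA (PySem.List.pyRange k (n + 1) 1) stack (t :: os) ans
        = solLoopA (PySem.List.pyRange (k + 1) (n + 1) 1) (k :: stack) (t :: os) ans := by
      rw [hcons, solLoopA.eq_def]
      cases stack with
      | nil => simp [hkne]
      | cons s rest => simp at hh; simp [hh, hkne]
    rw [hstep, IH (k + 1) (k :: stack) t os ans (by omega) (by omega) hn (by simp [hkne])]
    have : PySem.List.pyRange k t 1 = k :: PySem.List.pyRange (k + 1) t 1 :=
      PySem.List.pyRange_one_cons (by omega)
    rw [this]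
    simp

-- One A-step delivering the target straight from the container head.
lemma stepContainerA (c : Int) (cs stack : List Int) (t : Int) (os : List Int) (ans : Int)
    (hc : c = t) (hh : stack.head? ≠ some t) :
    solLoopA (c :: cs) stack (t :: os) ans = solLoopA cs stack os (ans + 1) := by
  rw [solLoopA.eq_def]
  cases stack with
  | nil => simp [hc]
  | cons s rest => simp at hh; simp [hh, hc]

-- One A-step delivering the target from the top of the stack.
lemma stepStackA (container : List Int) (s : Int) (rest : List Int) (t : Int) (os : List Int) (ans : Int)
    (hs : s = t) :
    solLoopA container (s :: rest) (t :: os) ans = solLoopA container rest os (ans + 1) := by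
  rw [solLoopA.eq_def]
  simp [hs]

-- Under the invariant, the stack top is t iff t satisfies B's deliverable test.
lemma top_iff_cond (k : Int) (delivered stack : List Int) (t : Int) (hInv : InvAB k delivered stack) :
    stack.head? = some t ↔ (1 ≤ t ∧ t < k ∧ t ∉ delivered ∧ ∀ u : Int, t < u → u < k → u ∈ delivered) := by
  obtain ⟨hmem, hpw, _⟩ := hInv
  constructor
  · intro hh
    cases stack with
    | nil => simp at hh
    | cons s rest =>
      simp at hh
      have hh' : t = s := hh.symm
      subst hh'
      have ht := (hmem t).mp List.mem_cons_self
      refine ⟨ht.1, ht.2.1, ht.2.2, ?_⟩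
      intro u hu huk
      by_contra hnd
      have : u ∈ t :: rest := (hmem u).mpr ⟨by omega, huk, hnd⟩
      rcases List.mem_cons.mp this with h | h
      · omega
      · have := (List.pairwise_cons.mp hpw).1 u h; omega
  · rintro ⟨h1, h2, h3, h4⟩
    have ht : t ∈ stack := (hmem t).mpr ⟨h1, h2, h3⟩
    cases stack with
    | nil => simp at ht
    | cons s rest =>
      have hs := (hmem s).mp List.mem_cons_self
      rcases List.mem_cons.mp ht with h | h
      · simp [h]
      · exfalso
        have hst : s > t := (List.pairwise_cons.mp hpw).1 t h
        exact hs.2.2 (h4 s hst hs.2.1)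

-- Main invariant lemma: A's loop on the container [k, n] equals B's set-based loop.
lemma loop_eq (n : Int) : ∀ (os : List Int) (k : Int) (delivered stack : List Int) (ans : Int),
    InvAB k delivered stack → 1 ≤ k →
    solLoopA (PySem.List.pyRange k (n + 1) 1) stack os ans = altLoop n os delivered k ans := by
  intro os
  induction os with
  | nil =>
    intro k delivered stack ans _ _
    rw [solLoopA.eq_def]; split <;> simp [altLoop]
  | cons t ts IH =>
    intro k delivered stack ans hInv hk
    have hmem := hInv.1
    have hdel := hInv.2.2
    by_cases hfresh : k ≤ t ∧ t ≤ n
    · -- deliver a fresh box from the container, pushing [k, t) on the way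
      obtain ⟨hkt, htn⟩ := hfresh
      have hhead : stack.head? ≠ some t := by
        intro hh
        cases stack with
        | nil => simp at hh
        | cons s rest =>
          simp at hh
          have := (hmem s).mp List.mem_cons_self; omega
      rw [pushA n (t - k).toNat k stack t ts ans rfl hkt htn hhead]
      rw [PySem.List.pyRange_one_cons (show t < n + 1 by omega)]
      have hhead' : ((PySem.List.pyRange k t 1).reverse ++ stack).head? ≠ some t := by
        intro hh
        have : t ∈ (PySem.List.pyRange k t 1).reverse ++ stack := by
          cases h : (PySem.List.pyRange k t 1).reverse ++ stack with
          | nil => rw [h] at hh; simp at hh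
          | cons a l => rw [h] at hh; simp at hh; exact hh ▸ List.mem_cons_self
        rcases List.mem_append.mp this with h | h
        · have := PySem.List.mem_pyRange_one.mp (List.mem_reverse.mp h); omega
        · have := (hmem t).mp h; omega
      rw [stepContainerA t _ _ t ts ans rfl hhead']
      have hInv' : InvAB (t + 1) (PySem.Set.add delivered t) ((PySem.List.pyRange k t 1).reverse ++ stack) := by
        refine ⟨?_, ?_, ?_⟩
        · intro j
          simp only [List.mem_append, List.mem_reverse, PySem.List.mem_pyRange_one,
            PySem.Set.mem_add]
          constructor
          · rintro (⟨h1, h2⟩ | h)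
            · exact ⟨by omega, by omega, by push Not; exact ⟨fun hj => by have := hdel j hj; omega, by omega⟩⟩
            · have := (hmem j).mp h
              exact ⟨this.1, by omega, by push Not; exact ⟨this.2.2, by omega⟩⟩
          · rintro ⟨h1, h2, h3⟩
            push Not at h3
            by_cases hjk : k ≤ j
            · exact Or.inl ⟨hjk, by omega⟩
            · exact Or.inr ((hmem j).mpr ⟨h1, by omega, h3.1⟩)
        · rw [List.pairwise_append]
          refine ⟨?_, hInv.2.1, ?_⟩
          · rw [List.pairwise_reverse]
            exact (PySem.List.pairwise_lt_pyRange_one k t).imp (fun h => h)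
          · intro a ha b hb
            have := PySem.List.mem_pyRange_one.mp (List.mem_reverse.mp ha)
            have := (hmem b).mp hb
            omega
        · intro j hj
          rw [PySem.Set.mem_add] at hj; rcases hj with h | h
          · have := hdel j h; omega
          · omega
      rw [IH (t + 1) (PySem.Set.add delivered t) _ (ans + 1) hInv' (by omega)]
      rw [altLoop]
      simp [hkt, htn]
    · by_cases hcond : 1 ≤ t ∧ t < k ∧ t ∉ delivered ∧ ∀ u : Int, t < u → u < k → u ∈ delivered
      · -- deliver from the top of the stack
        have hh : stack.head? = some t := (top_iff_cond k delivered stack t hInv).mpr hcond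
        cases stack with
        | nil => simp at hh
        | cons s rest =>
          simp at hh
          have hh' : t = s := hh.symm
          subst hh'
          rw [stepStackA _ t rest t ts ans rfl]
          have hInv' : InvAB k (PySem.Set.add delivered t) rest := by
            refine ⟨?_, (List.pairwise_cons.mp hInv.2.1).2, ?_⟩
            · intro j
              constructor
              · intro hj
                have hm := (hmem j).mp (List.mem_cons_of_mem _ hj)
                have : t > j := (List.pairwise_cons.mp hInv.2.1).1 j hj
                refine ⟨hm.1, hm.2.1, ?_⟩
                rw [PySem.Set.mem_add]; push Not
                exact ⟨hm.2.2, by omega⟩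
              · rintro ⟨h1, h2, h3⟩
                rw [PySem.Set.mem_add] at h3; push Not at h3
                have : j ∈ t :: rest := (hmem j).mpr ⟨h1, h2, h3.1⟩
                rcases List.mem_cons.mp this with h | h
                · exact absurd h h3.2
                · exact h
            · intro j hj
              rw [PySem.Set.mem_add] at hj; rcases hj with h | h
              · exact hdel j h
              · omega
          rw [IH k (PySem.Set.add delivered t) rest (ans + 1) hInv' hk]
          rw [altLoop]
          have h1 : ¬ (k ≤ t ∧ t ≤ n) := hfresh
          have hc1 : PySem.Set.contains delivered t = false := by
            rw [Bool.eq_false_iff]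
            intro h; exact hcond.2.2.1 ((PySem.Set.contains_iff _ _).mp h)
          have hc2 : ((PySem.List.pyRange (t + 1) k 1).all (fun u => PySem.Set.contains delivered u)) = true := by
            rw [List.all_eq_true]
            intro u hu
            have := PySem.List.mem_pyRange_one.mp hu
            exact (PySem.Set.contains_iff _ _).mpr (hcond.2.2.2 u (by omega) (by omega))
          simp only [if_neg (show ¬ (k ≤ t ∧ t ≤ n) from h1)]
          rw [if_pos ⟨hcond.1, hcond.2.1, hc1, hc2⟩]
      · -- stall: A pushes what is left and breaks; B breaks at once
        have hhead : stack.head? ≠ some t := by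
          intro hh
          exact hcond ((top_iff_cond k delivered stack t hInv).mp hh)
        rw [drainA _ stack t ts ans (by
            intro h
            have := PySem.List.mem_pyRange_one.mp h
            exact hfresh ⟨this.1, by omega⟩) hhead]
        have hnc : ¬ (1 ≤ t ∧ t < k ∧ PySem.Set.contains delivered t = false ∧
            ((PySem.List.pyRange (t + 1) k 1).all (fun u => PySem.Set.contains delivered u)) = true) := by
          rintro ⟨h1, h2, h3, h4⟩
          refine hcond ⟨h1, h2, fun hm => by rw [(PySem.Set.contains_iff _ _).mpr hm] at h3; simp at h3, ?_⟩
          intro u hu huk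
          have := List.all_eq_true.mp h4 u (PySem.List.mem_pyRange_one.mpr ⟨by omega, huk⟩)
          exact (PySem.Set.contains_iff _ _).mp this
        rw [altLoop, if_neg (show ¬ ((k ≤ t ∧ t ≤ n)) from hfresh), if_neg hnc]

-- ===== VERDICT (by name: the statement is the Claim_ definition above) =====
theorem solution_spec : Claim_equal_solution := by
  intro order _
  unfold Spec_solution solution solution_alt
  exact loop_eq (order.length : Int) order 1 PySem.Set.empty [] 0
    ⟨by intro j; simp [PySem.Set.empty], by simp, by simp [PySem.Set.empty]⟩ le_rfl
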